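-- pv_equiv track=rewrite | github.com/delphix/dcs-for-azure-templates | dcsazure_Cosmos_NoSQL_to_Cosmos_NoSQL_mask_pl/ADLS_to_Cosmos/function_app.py | _determine_filter_rids
-- ===== SOURCE A (Python) =====
-- from typing import Dict, List, Any, Tuple, Set
--
-- def _determine_filter_rids(arr_name: str, current_depth: int, parent_rids: Set[str],
--                            rids_by_depth: Dict[int, Set[str]],
--                            all_objects_by_rid: Dict) -> Set[str]:
--     """
--     Determine which RIDs to filter by for a given array.
--
--     Uses array markers (_has_array_*) to intelligently determine which parent
--     objects should have this particular child array, avoiding unnecessary processing.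
--
--     Args:
--         arr_name: Name of the array (e.g., "orders.items")
--         current_depth: Current processing depth
--         parent_rids: Set of parent document RIDs
--         rids_by_depth: Dictionary mapping depth to sets of RIDs
--         all_objects_by_rid: Dictionary of all objects indexed by RID
--
--     Returns:
--         Set of RIDs that should be used to filter this array's CSV
--     """
--     arr_parts = arr_name.split(".")
--     possible_markers = [".".join(arr_parts[i:]) for i in range(len(arr_parts))]
--
--     for marker_suffix in possible_markers:
--         marker_key = f"_has_array_{marker_suffix}"
--         rids_with_marker = {rid for rid, obj in all_objects_by_rid.items() if marker_key in obj}
--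
--         if rids_with_marker:
--             if current_depth == 0:
--                 valid_rids = rids_with_marker & parent_rids
--                 if valid_rids:
--                     return valid_rids
--             else:
--                 valid_rids = set()
--                 for depth in range(current_depth + 1):
--                     if depth in rids_by_depth:
--                         valid_rids.update(rids_with_marker & rids_by_depth[depth])
--                 if valid_rids:
--                     return valid_rids
--
--     # Fallback
--     if current_depth == 0:
--         return parent_rids
--
--     for d in range(current_depth, -1, -1):
--         if d in rids_by_depth and rids_by_depth[d]:
--             return rids_by_depth[d]
--
--     return set()
-- ===== SOURCE B (Python) =====
-- def _determine_filter_rids(arr_name, current_depth, parent_rids, rids_by_depth, all_objects_by_rid):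
--     # One pass over the objects: invert them into key -> set of RIDs carrying that key,
--     # so each marker probe is a dict lookup instead of a scan of every object (alternative strategy).
--     rids_by_key = {}
--     for rid, obj in all_objects_by_rid.items():
--         for key in obj:
--             rids_by_key.setdefault(key, set()).add(rid)
--     # The depths that can contribute, computed once (ascending, non-empty buckets only).
--     depths = sorted(d for d in rids_by_depth if 0 <= d <= current_depth and rids_by_depth[d])
--     parts = arr_name.split(".")
--     for i in range(len(parts)):
--         marked = rids_by_key.get("_has_array_" + ".".join(parts[i:]))
--         if not marked:
--             continue
--         if current_depth == 0:
--             valid = marked & parent_rids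
--         else:
--             valid = set()
--             for d in depths:
--                 valid |= marked & rids_by_depth[d]
--         if valid:
--             return valid
--     if current_depth == 0:
--         return parent_rids
--     return rids_by_depth[depths[-1]] if depths else set()
-- ===== Notes on version B (the rewrite author's own statement) =====
-- stated objective: alternative
-- what changed: B builds an inverted index key->RIDs in one pass over all objects and looks each marker up in it (A rescans every object for every marker), and computes the contributing depth list once by sorting the dict's keys instead of re-walking range(current_depth+1) per marker and counting down from current_depth in the fallback; it trades index-building work for the removal of A's per-marker scans.
import Mathlib
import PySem

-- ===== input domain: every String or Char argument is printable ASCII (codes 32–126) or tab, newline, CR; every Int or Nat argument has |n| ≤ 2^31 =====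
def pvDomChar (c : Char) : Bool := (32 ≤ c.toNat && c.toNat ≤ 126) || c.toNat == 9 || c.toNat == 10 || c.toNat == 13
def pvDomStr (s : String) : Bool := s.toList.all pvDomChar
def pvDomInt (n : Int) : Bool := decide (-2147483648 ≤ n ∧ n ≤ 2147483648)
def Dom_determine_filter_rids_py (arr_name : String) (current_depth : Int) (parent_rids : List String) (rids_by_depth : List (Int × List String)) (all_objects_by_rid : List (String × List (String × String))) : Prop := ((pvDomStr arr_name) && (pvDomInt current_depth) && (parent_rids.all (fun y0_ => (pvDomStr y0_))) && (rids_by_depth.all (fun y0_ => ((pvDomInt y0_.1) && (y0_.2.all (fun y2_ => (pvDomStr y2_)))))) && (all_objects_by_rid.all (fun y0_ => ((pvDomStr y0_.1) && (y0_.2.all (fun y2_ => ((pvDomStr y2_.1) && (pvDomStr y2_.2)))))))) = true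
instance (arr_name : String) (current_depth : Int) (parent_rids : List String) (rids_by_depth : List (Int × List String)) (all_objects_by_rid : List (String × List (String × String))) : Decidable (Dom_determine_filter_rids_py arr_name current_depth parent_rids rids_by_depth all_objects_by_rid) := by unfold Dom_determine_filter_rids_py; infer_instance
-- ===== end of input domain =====

-- B replaces A's per-marker scan of all objects by one inverted index key → RIDs built in a
-- single pass over the objects, and computes the list of contributing depths once instead of
-- re-walking range(current_depth+1) for every marker (objective: alternative algorithm).

-- ===== PORT A =====

-- {rid for rid, obj in all_objects_by_rid.items() if marker_key in obj}
def pvMarkedA (objs : List (String × List (String × String))) (marker_key : String) : List String :=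
  PySem.Set.ofList ((objs.filter (fun p => PySem.Dict.contains ⟨p.2⟩ marker_key)).map (fun p => p.1))

-- the inner 'for depth in range(current_depth + 1): …' loop of A
def pvValidDepthsA (marked : List String) (current_depth : Int) (rbd : List (Int × List String)) : List String :=
  (PySem.List.pyRange 0 (current_depth + 1) 1).foldl
    (fun v d => if PySem.Dict.contains ⟨rbd⟩ d
                then PySem.Set.update v (PySem.Set.inter marked (PySem.Dict.getD ⟨rbd⟩ d []))
                else v) []

-- A's 'for marker_suffix in possible_markers: …' loop; some = early return, none = fall through
def pvMarkerLoopA (markers : List String) (current_depth : Int) (parent_rids : List String)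
    (rbd : List (Int × List String)) (objs : List (String × List (String × String))) : Option (List String) :=
  match markers with
  | [] => none
  | m :: rest =>
    let marked := pvMarkedA objs ("_has_array_" ++ m)
    if marked.isEmpty then pvMarkerLoopA rest current_depth parent_rids rbd objs
    else if current_depth = 0 then
      let valid := PySem.Set.inter marked parent_rids
      if valid.isEmpty then pvMarkerLoopA rest current_depth parent_rids rbd objs else some valid
    else
      let valid := pvValidDepthsA marked current_depth rbd
      if valid.isEmpty then pvMarkerLoopA rest current_depth parent_rids rbd objs else some valid

-- A's fallback 'for d in range(current_depth, -1, -1): …'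
def pvFbLoopA (ds : List Int) (rbd : List (Int × List String)) : List String :=
  match ds with
  | [] => []
  | d :: rest =>
    if PySem.Dict.contains ⟨rbd⟩ d && !(PySem.Dict.getD ⟨rbd⟩ d []).isEmpty
    then PySem.Dict.getD ⟨rbd⟩ d []
    else pvFbLoopA rest rbd

def determine_filter_rids_py (arr_name : String) (current_depth : Int) (parent_rids : List String) (rids_by_depth : List (Int × List String)) (all_objects_by_rid : List (String × List (String × String))) : List String :=
  let arr_parts := (PySem.Str.split? arr_name ".").getD []   -- sep "." is non-empty: split? is always some
  let possible_markers := (PySem.List.pyRange 0 arr_parts.length 1).map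
    (fun i => PySem.Str.join "." (PySem.List.slice arr_parts (some i) none))
  match pvMarkerLoopA possible_markers current_depth parent_rids rids_by_depth all_objects_by_rid with
  | some v => v
  | none =>
    if current_depth = 0 then parent_rids
    else pvFbLoopA (PySem.List.pyRange current_depth (-1) (-1)) rids_by_depth

-- ===== PORT B =====

-- rids_by_key: one pass over the objects; setdefault(key, set()).add(rid) = modify key [] (add · rid)
def pvIndexB (objs : List (String × List (String × String))) : PySem.Dict String (List String) :=
  objs.foldl (fun idx p =>
    p.2.foldl (fun idx kv => PySem.Dict.modify idx kv.1 [] (fun s => PySem.Set.add s p.1)) idx) ⟨[]⟩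

-- depths = sorted(d for d in rids_by_depth if 0 <= d <= current_depth and rids_by_depth[d])
def pvDepthsB (current_depth : Int) (rbd : List (Int × List String)) : List Int :=
  PySem.List.sorted
    ((PySem.Dict.keys ⟨rbd⟩).filter
      (fun d => decide (0 ≤ d) && decide (d ≤ current_depth) && !(PySem.Dict.getD ⟨rbd⟩ d []).isEmpty))
    (fun d => d) false

-- B's single marker loop, with B's fallback at the end of the list
def pvLoopB (markers : List String) (current_depth : Int) (parent_rids : List String)
    (rbd : List (Int × List String)) (depths : List Int) (idx : PySem.Dict String (List String)) : List String :=
  match markers with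
  | [] =>
    if current_depth = 0 then parent_rids
    else match depths.getLast? with
         | some d => PySem.Dict.getD ⟨rbd⟩ d []
         | none => []
  | m :: rest =>
    let marked := PySem.Dict.getD idx ("_has_array_" ++ m) []
    if marked.isEmpty then pvLoopB rest current_depth parent_rids rbd depths idx
    else
      let valid := if current_depth = 0 then PySem.Set.inter marked parent_rids
                   else depths.foldl (fun v d => PySem.Set.update v (PySem.Set.inter marked (PySem.Dict.getD ⟨rbd⟩ d []))) []
      if valid.isEmpty then pvLoopB rest current_depth parent_rids rbd depths idx else valid

def determine_filter_rids_py_alt (arr_name : String) (current_depth : Int) (parent_rids : List String) (rids_by_depth : List (Int × List String)) (all_objects_by_rid : List (String × List (String × String))) : List String :=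
  let idx := pvIndexB all_objects_by_rid
  let depths := pvDepthsB current_depth rids_by_depth
  let parts := (PySem.Str.split? arr_name ".").getD []   -- sep "." is non-empty: split? is always some
  let markers := (PySem.List.pyRange 0 parts.length 1).map
    (fun i => PySem.Str.join "." (PySem.List.slice parts (some i) none))
  pvLoopB markers current_depth parent_rids rids_by_depth depths idx

-- ===== PRECONDITION & SPEC =====
-- Pre_ excludes dict arguments whose association lists carry duplicate keys: a Python dict cannot
-- hold them (dict construction keeps one entry per key), so on such lists the association-list
-- representation no longer determines the Python dict and both behaviours are accidental.
def Pre_determine_filter_rids_py (arr_name : String) (current_depth : Int) (parent_rids : List String) (rids_by_depth : List (Int × List String)) (all_objects_by_rid : List (String × List (String × String))) : Prop :=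
  (rids_by_depth.map Prod.fst).Nodup ∧ (all_objects_by_rid.map Prod.fst).Nodup
instance (arr_name : String) (current_depth : Int) (parent_rids : List String) (rids_by_depth : List (Int × List String)) (all_objects_by_rid : List (String × List (String × String))) : Decidable (Pre_determine_filter_rids_py arr_name current_depth parent_rids rids_by_depth all_objects_by_rid) := by unfold Pre_determine_filter_rids_py; infer_instance

def pvWitness_determine_filter_rids_py : String × Int × List String × (List (Int × List String)) × (List (String × List (String × String))) :=
  ("a.b", 1, ["r1"], [(0, ["r1"]), (1, ["r2"])], [("r1", [("_has_array_a.b", "1")]), ("r2", [("x", "y")])])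

def Spec_determine_filter_rids_py (arr_name : String) (current_depth : Int) (parent_rids : List String) (rids_by_depth : List (Int × List String)) (all_objects_by_rid : List (String × List (String × String))) (out : List String) : Prop := out = determine_filter_rids_py_alt arr_name current_depth parent_rids rids_by_depth all_objects_by_rid
instance (arr_name : String) (current_depth : Int) (parent_rids : List String) (rids_by_depth : List (Int × List String)) (all_objects_by_rid : List (String × List (String × String))) (out : List String) : Decidable (Spec_determine_filter_rids_py arr_name current_depth parent_rids rids_by_depth all_objects_by_rid out) := by unfold Spec_determine_filter_rids_py; infer_instance

-- ===== CLAIM (what is proved, stated in full; the proofs are below) =====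
def Claim_equal_determine_filter_rids_py : Prop := ∀ (arr_name : String) (current_depth : Int) (parent_rids : List String) (rids_by_depth : List (Int × List String)) (all_objects_by_rid : List (String × List (String × String))), Dom_determine_filter_rids_py arr_name current_depth parent_rids rids_by_depth all_objects_by_rid → Pre_determine_filter_rids_py arr_name current_depth parent_rids rids_by_depth all_objects_by_rid → Spec_determine_filter_rids_py arr_name current_depth parent_rids rids_by_depth all_objects_by_rid (determine_filter_rids_py arr_name current_depth parent_rids rids_by_depth all_objects_by_rid)

-- ===== LEMMAS AND PROOFS =====

-- (1) the inverted index agrees with A's per-marker comprehension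
theorem pvSetAddIdem (s : PySem.Set String) (x : String) :
    PySem.Set.add (PySem.Set.add s x) x = PySem.Set.add s x := by
  simp [PySem.Set.add]
  split <;> simp_all

theorem pvIndex_inner (kvs : List (String × String)) (rid m : String) (idx : PySem.Dict String (List String)) :
    PySem.Dict.getD (kvs.foldl (fun idx kv => PySem.Dict.modify idx kv.1 [] (fun s => PySem.Set.add s rid)) idx) m []
      = (if kvs.any (fun kv => kv.1 == m) then PySem.Set.add (PySem.Dict.getD idx m []) rid
         else PySem.Dict.getD idx m []) := by
  induction kvs generalizing idx with
  | nil => simp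
  | cons kv rest ih =>
    simp only [List.foldl_cons, List.any_cons, ih]
    by_cases hk : kv.1 = m
    · subst hk
      have h1 : PySem.Dict.getD (PySem.Dict.modify idx kv.1 [] (fun s => PySem.Set.add s rid)) kv.1 []
          = PySem.Set.add (PySem.Dict.getD idx kv.1 []) rid := by
        simp [PySem.Dict.modify, PySem.Dict.getD, PySem.Dict.get?_insert_self]
      simp [h1, pvSetAddIdem]
    · have h2 : PySem.Dict.getD (PySem.Dict.modify idx kv.1 [] (fun s => PySem.Set.add s rid)) m []
          = PySem.Dict.getD idx m [] := by
        simp [PySem.Dict.modify, PySem.Dict.getD, PySem.Dict.get?_insert_of_ne _ _ (Ne.symm hk)]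
      have hb : (kv.1 == m) = false := by simp [hk]
      simp only [hb, Bool.false_or, h2]

theorem pvFoldFilterMap {α β γ : Type} (c : α → Bool) (f : α → β) (g : γ → β → γ) :
    ∀ (objs : List α) (s : γ),
      ((objs.filter c).map f).foldl g s = objs.foldl (fun s p => if c p then g s (f p) else s) s := by
  intro objs
  induction objs with
  | nil => intro s; simp
  | cons p rest ih =>
    intro s
    by_cases h : c p <;> simp [h, ih]

theorem pvIndex_getD (objs : List (String × List (String × String))) (m : String) :
    PySem.Dict.getD (pvIndexB objs) m [] = pvMarkedA objs m := by
  have main : ∀ (l : List (String × List (String × String))) (idx : PySem.Dict String (List String)),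
      PySem.Dict.getD (l.foldl (fun idx p => p.2.foldl (fun idx kv => PySem.Dict.modify idx kv.1 [] (fun s => PySem.Set.add s p.1)) idx) idx) m []
        = l.foldl (fun s p => if p.2.any (fun kv => kv.1 == m) then PySem.Set.add s p.1 else s) (PySem.Dict.getD idx m []) := by
    intro l
    induction l with
    | nil => intro idx; simp
    | cons p rest ih =>
      intro idx
      simp only [List.foldl_cons, ih, pvIndex_inner]
  show PySem.Dict.getD (objs.foldl _ ⟨[]⟩) m [] = _
  rw [main]
  have h0 : PySem.Dict.getD (⟨[]⟩ : PySem.Dict String (List String)) m [] = [] := by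
    simp [PySem.Dict.getD, PySem.Dict.get?]
  rw [h0]
  unfold pvMarkedA
  rw [PySem.Set.ofList]
  rw [pvFoldFilterMap (fun p => PySem.Dict.contains ⟨p.2⟩ m) (fun p : String × List (String × String) => p.1) PySem.Set.add objs]
  rfl

-- (2) B's one-shot depth list = A's guarded range, filtered
theorem pvDepthsB_eq (current_depth : Int) (rbd : List (Int × List String))
    (h : (rbd.map Prod.fst).Nodup) :
    pvDepthsB current_depth rbd
      = (PySem.List.pyRange 0 (current_depth + 1) 1).filter
          (fun d => PySem.Dict.contains ⟨rbd⟩ d && !(PySem.Dict.getD ⟨rbd⟩ d []).isEmpty) := by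
  unfold pvDepthsB
  apply PySem.List.sorted_eq_of_perm_of_pairwise_lt
  · rw [List.perm_ext_iff_of_nodup]
    · intro d
      simp only [List.mem_filter, PySem.List.mem_pyRange_one, PySem.Dict.contains, PySem.Dict.keys,
        List.any_eq_true, beq_iff_eq, Bool.and_eq_true, decide_eq_true_eq, List.mem_map]
      constructor
      · rintro ⟨⟨h0, h1⟩, ⟨p, hp, hpd⟩, hne⟩
        exact ⟨⟨p, hp, hpd⟩, ⟨h0, by omega⟩, hne⟩
      · rintro ⟨⟨p, hp, hpd⟩, ⟨h0, h1⟩, hne⟩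
        exact ⟨⟨h0, by omega⟩, ⟨p, hp, hpd⟩, hne⟩
    · exact ((PySem.List.pairwise_lt_pyRange_one 0 (current_depth + 1)).sublist
        List.filter_sublist).imp ne_of_lt
    · exact (List.Nodup.sublist List.filter_sublist h)
  · exact ((PySem.List.pairwise_lt_pyRange_one 0 (current_depth + 1)).sublist
      List.filter_sublist)

theorem pvFoldlNoop {α β : Type} (g : β → α → β) (q : α → Bool)
    (h : ∀ d, q d = false → ∀ v, g v d = v) :
    ∀ (l : List α) (init : β), l.foldl g init = (l.filter q).foldl g init := by
  intro l
  induction l with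
  | nil => intro init; rfl
  | cons d rest ih =>
    intro init
    cases hq : q d with
    | true => simp [hq, ih]
    | false => simp [hq, h d hq init, ih]

theorem pvValid_eq (marked : List String) (current_depth : Int) (rbd : List (Int × List String))
    (h : (rbd.map Prod.fst).Nodup) :
    pvValidDepthsA marked current_depth rbd
      = (pvDepthsB current_depth rbd).foldl
          (fun v d => PySem.Set.update v (PySem.Set.inter marked (PySem.Dict.getD ⟨rbd⟩ d []))) [] := by
  unfold pvValidDepthsA
  rw [pvDepthsB_eq current_depth rbd h, ← List.foldl_filter]
  rw [pvFoldlNoop (fun v d => PySem.Set.update v (PySem.Set.inter marked (PySem.Dict.getD ⟨rbd⟩ d [])))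
    (fun d => !(PySem.Dict.getD ⟨rbd⟩ d []).isEmpty) ?_ _ []
    , List.filter_filter]
  · rw [List.filter_congr (fun d _ => Bool.and_comm (!(PySem.Dict.getD ⟨rbd⟩ d []).isEmpty)
      (PySem.Dict.contains ⟨rbd⟩ d))]
  · intro d hq v
    simp only [Bool.not_eq_false', List.isEmpty_iff] at hq
    simp [hq, PySem.Set.update, PySem.Set.inter, PySem.Set.contains]

-- (3) fallbacks agree
theorem pvFbLoopA_head (rbd : List (Int × List String)) :
    ∀ (ds : List Int),
      pvFbLoopA ds rbd
        = (match (ds.filter (fun d => PySem.Dict.contains ⟨rbd⟩ d && !(PySem.Dict.getD ⟨rbd⟩ d []).isEmpty)).head? with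
           | some d => PySem.Dict.getD ⟨rbd⟩ d []
           | none => []) := by
  intro ds
  induction ds with
  | nil => rfl
  | cons d rest ih =>
    unfold pvFbLoopA
    cases hq : (PySem.Dict.contains (⟨rbd⟩ : PySem.Dict Int (List String)) d && !(PySem.Dict.getD ⟨rbd⟩ d []).isEmpty) with
    | true =>
      simp only [List.filter_cons, hq, if_true, List.head?_cons]
    | false =>
      simp only [List.filter_cons, hq, Bool.false_eq_true, if_false]
      simpa using ih

theorem pvRange_down (cd : Int) :
    PySem.List.pyRange cd (-1) (-1) = (PySem.List.pyRange 0 (cd+1) 1).reverse := by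
  unfold PySem.List.pyRange
  by_cases hcd : -1 < cd
  · have h1 : (0:Int) < cd + 1 := by omega
    norm_num [hcd, h1]
    apply List.ext_getElem
    · simp
    · intro i h1' h2'
      simp only [List.getElem_map, List.getElem_reverse, List.getElem_range]
      simp only [List.length_reverse, List.length_map, List.length_range] at h1' h2' ⊢
      omega
  · have h1 : ¬ ((0:Int) < cd + 1) := by omega
    norm_num [hcd, h1]

theorem pvFb_eq (current_depth : Int) (rbd : List (Int × List String))
    (h : (rbd.map Prod.fst).Nodup) :
    pvFbLoopA (PySem.List.pyRange current_depth (-1) (-1)) rbd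
      = (match (pvDepthsB current_depth rbd).getLast? with
         | some d => PySem.Dict.getD ⟨rbd⟩ d []
         | none => []) := by
  rw [pvRange_down, pvFbLoopA_head, List.filter_reverse, List.head?_reverse,
    ← pvDepthsB_eq current_depth rbd h]

-- (4) loops agree
theorem pvLoop_eq (markers : List String) (current_depth : Int) (parent_rids : List String)
    (rbd : List (Int × List String)) (objs : List (String × List (String × String)))
    (h : (rbd.map Prod.fst).Nodup) :
    pvLoopB markers current_depth parent_rids rbd (pvDepthsB current_depth rbd) (pvIndexB objs)
      = (match pvMarkerLoopA markers current_depth parent_rids rbd objs with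
         | some v => v
         | none => if current_depth = 0 then parent_rids
                   else pvFbLoopA (PySem.List.pyRange current_depth (-1) (-1)) rbd) := by
  induction markers with
  | nil =>
    by_cases h0 : current_depth = 0
    · simp [pvLoopB, pvMarkerLoopA, h0]
    · simp only [pvLoopB, pvMarkerLoopA, h0, if_false]
      rw [pvFb_eq current_depth rbd h]
  | cons m rest ih =>
    simp only [pvLoopB, pvMarkerLoopA]
    rw [pvIndex_getD]
    by_cases he : (pvMarkedA objs ("_has_array_" ++ m)).isEmpty
    · simp only [he, if_true]
      exact ih
    · simp only [he, Bool.false_eq_true, if_false]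
      by_cases h0 : current_depth = 0
      · simp only [h0, if_true]
        by_cases hv : (PySem.Set.inter (pvMarkedA objs ("_has_array_" ++ m)) parent_rids).isEmpty
        · simp only [hv, if_true, ite_self]
          simpa only [h0, ite_self] using ih
        · simp only [hv, Bool.false_eq_true, if_false]
      · simp only [h0, if_false]
        rw [← pvValid_eq (pvMarkedA objs ("_has_array_" ++ m)) current_depth rbd h]
        by_cases hv : (pvValidDepthsA (pvMarkedA objs ("_has_array_" ++ m)) current_depth rbd).isEmpty
        · simp only [hv, if_true, ite_self]
          simpa only [h0, if_false, ite_self] using ih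
        · simp only [hv, Bool.false_eq_true, if_false]

-- ===== VERDICT (by name: the statement is the Claim_ definition above) =====
theorem determine_filter_rids_py_spec : Claim_equal_determine_filter_rids_py := by
  intro arr cd parent rbd objs _ hpre
  unfold Spec_determine_filter_rids_py determine_filter_rids_py determine_filter_rids_py_alt
  rw [pvLoop_eq _ _ _ _ _ hpre.1]
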